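-- pv_equiv track=rewrite | github.com/aibozo/codeur | src/test_agent/test_executor.py | _summarize_error
-- ===== SOURCE A (Python) =====
-- def _summarize_error(error_message: str) -> str:
--     """Create a concise summary of the error."""
--     if not error_message:
--         return "Unknown error"
--
--     lines = error_message.split('\n')
--
--     # Find the actual error line
--     for line in reversed(lines):
--         line = line.strip()
--         if line and not line.startswith('>') and not line.startswith('E'):
--             if len(line) > 200:
--                 return line[:200] + "..."
--             return line
--
--     # Fallback to first non-empty line
--     for line in lines:
--         line = line.strip()
--         if line:
--             if len(line) > 200:
--                 return line[:200] + "..."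
--             return line
--
--     return "Error details unavailable"
-- ===== SOURCE B (Python) =====
-- def _truncate(line):
--     return line[:200] + "..." if len(line) > 200 else line
--
--
-- def _summarize_error(error_message: str) -> str:
--     """Create a concise summary of the error (single forward pass)."""
--     if not error_message:
--         return "Unknown error"
--     best = None
--     first_nonempty = None
--     for raw in error_message.split('\n'):
--         line = raw.strip()
--         if not line:
--             continue
--         if first_nonempty is None:
--             first_nonempty = line
--         if not line.startswith('>') and not line.startswith('E'):
--             best = line
--     chosen = best if best is not None else first_nonempty
--     if chosen is None:
--         return "Error details unavailable"
--     return _truncate(chosen)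
-- ===== Notes on version B (the rewrite author's own statement) =====
-- stated objective: alternative
-- what changed: Replaces A's two scans (a reversed-order scan with early return, then a forward fallback scan) by one forward pass that maintains two accumulators (last qualifying line and first non-empty line) and decides afterwards.
import Mathlib
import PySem

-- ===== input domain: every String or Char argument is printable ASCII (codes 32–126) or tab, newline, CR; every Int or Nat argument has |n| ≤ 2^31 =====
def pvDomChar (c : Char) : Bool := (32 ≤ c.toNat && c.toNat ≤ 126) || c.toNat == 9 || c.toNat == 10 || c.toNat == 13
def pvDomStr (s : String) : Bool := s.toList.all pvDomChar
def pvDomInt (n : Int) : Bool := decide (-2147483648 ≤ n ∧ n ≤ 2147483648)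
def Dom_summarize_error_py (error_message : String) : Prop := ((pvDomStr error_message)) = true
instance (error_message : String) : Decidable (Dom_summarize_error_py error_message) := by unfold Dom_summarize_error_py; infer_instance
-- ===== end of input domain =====

-- B replaces A's two scans (reversed with early return, then forward fallback) by one
-- forward pass carrying two accumulators; same return value, similar cost (objective: alternative).

-- ===== PORT A =====
-- first loop of A: over reversed(lines), early return on the first qualifying stripped line
def pvLoopRevA : List String → Option String
  | [] => none
  | l :: rest =>
    let line := PySem.Str.strip l
    if PySem.Str.len line != 0 && !PySem.Str.startswith line ">" && !PySem.Str.startswith line "E" then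
      -- 'line[:200] + "..."' : slice then append, exact on ASCII code points
      if 200 < PySem.Str.len line then
        some (String.ofList ((PySem.Str.slice line none (some 200)).toList ++ "...".toList))
      else some line
    else pvLoopRevA rest

-- second loop of A: forward, first non-empty stripped line
def pvLoopFwdA : List String → Option String
  | [] => none
  | l :: rest =>
    let line := PySem.Str.strip l
    if PySem.Str.len line != 0 then
      if 200 < PySem.Str.len line then
        some (String.ofList ((PySem.Str.slice line none (some 200)).toList ++ "...".toList))
      else some line
    else pvLoopFwdA rest

def summarize_error_py (error_message : String) : String :=
  if PySem.Str.len error_message == 0 then "Unknown error"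
  else
    let lines := (PySem.Str.split? error_message "\n").getD []
    match pvLoopRevA lines.reverse with
    | some r => r
    | none =>
      match pvLoopFwdA lines with
      | some r => r
      | none => "Error details unavailable"

-- ===== PORT B =====
-- B's helper _truncate
def pvTruncB (line : String) : String :=
  if 200 < PySem.Str.len line then
    String.ofList ((PySem.Str.slice line none (some 200)).toList ++ "...".toList)
  else line

-- B's single forward loop: state (best, first_nonempty)
def pvScanB : List String → Option String → Option String → Option String × Option String
  | [], best, first => (best, first)
  | raw :: rest, best, first =>
    let line := PySem.Str.strip raw
    if PySem.Str.len line != 0 then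
      let first' := match first with | none => some line | some f => some f
      let best' :=
        if !PySem.Str.startswith line ">" && !PySem.Str.startswith line "E" then some line
        else best
      pvScanB rest best' first'
    else pvScanB rest best first

def summarize_error_py_alt (error_message : String) : String :=
  if PySem.Str.len error_message == 0 then "Unknown error"
  else
    let lines := (PySem.Str.split? error_message "\n").getD []
    let bf := pvScanB lines none none
    let chosen := match bf.1 with | some b => some b | none => bf.2
    match chosen with
    | some line => pvTruncB line
    | none => "Error details unavailable"

-- ===== PRECONDITION & SPEC =====
def Spec_summarize_error_py (error_message : String) (out : String) : Prop := out = summarize_error_py_alt error_message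
instance (error_message : String) (out : String) : Decidable (Spec_summarize_error_py error_message out) := by unfold Spec_summarize_error_py; infer_instance

-- ===== CLAIM (what is proved, stated in full; the proofs are below) =====
def Claim_equal_summarize_error_py : Prop := ∀ (error_message : String), Dom_summarize_error_py error_message → Spec_summarize_error_py error_message (summarize_error_py error_message)

-- ===== LEMMAS AND PROOFS =====

-- the LAST qualifying stripped line of the list (none if there is none)
def pvLastGood : List String → Option String
  | [] => none
  | l :: rest =>
    match pvLastGood rest with
    | some g => some g
    | none =>
      let line := PySem.Str.strip l
      if PySem.Str.len line != 0 && !PySem.Str.startswith line ">" && !PySem.Str.startswith line "E" then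
        some line
      else none

-- the FIRST non-empty stripped line of the list
def pvFirstNE : List String → Option String
  | [] => none
  | l :: rest =>
    let line := PySem.Str.strip l
    if PySem.Str.len line != 0 then some line else pvFirstNE rest

theorem pvLoopRevA_append_singleton (ys : List String) (l : String) :
    pvLoopRevA (ys ++ [l]) =
      match pvLoopRevA ys with
      | some r => some r
      | none => pvLoopRevA [l] := by
  induction ys with
  | nil => simp only [List.nil_append, pvLoopRevA]
  | cons y ys ih =>
    simp only [List.cons_append, pvLoopRevA]
    split
    · split <;> rfl
    · exact ih

theorem pvLoopRevA_reverse (xs : List String) :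
    pvLoopRevA xs.reverse = (pvLastGood xs).map pvTruncB := by
  induction xs with
  | nil => rfl
  | cons l rest ih =>
    simp only [List.reverse_cons, pvLoopRevA_append_singleton, ih, pvLastGood]
    cases pvLastGood rest with
    | some g => rfl
    | none =>
      simp only [Option.map_none]
      rw [pvLoopRevA, pvLoopRevA]
      by_cases hc : (PySem.Str.len (PySem.Str.strip l) != 0 &&
          !PySem.Str.startswith (PySem.Str.strip l) ">" &&
          !PySem.Str.startswith (PySem.Str.strip l) "E") = true
      · simp only [hc, if_true, Option.map_some, pvTruncB]
        by_cases ht : 200 < PySem.Str.len (PySem.Str.strip l)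
        · rw [if_pos ht, if_pos ht]
        · rw [if_neg ht, if_neg ht]
      · simp only [hc, Bool.false_eq_true, if_false, Option.map_none]

theorem pvLoopFwdA_eq (xs : List String) :
    pvLoopFwdA xs = (pvFirstNE xs).map pvTruncB := by
  induction xs with
  | nil => rfl
  | cons l rest ih =>
    simp only [pvLoopFwdA, pvFirstNE]
    split
    · simp only [Option.map_some, pvTruncB]
      split <;> rfl
    · exact ih

theorem pvScanB_spec (xs : List String) (best first : Option String) :
    pvScanB xs best first =
      ((match pvLastGood xs with | some g => some g | none => best),
       (match first with | some f => some f | none => pvFirstNE xs)) := by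
  induction xs generalizing best first with
  | nil => cases best <;> cases first <;> rfl
  | cons l rest ih =>
    simp only [pvScanB, pvLastGood, pvFirstNE]
    by_cases hne : (PySem.Str.len (PySem.Str.strip l) != 0) = true
    · simp only [hne, if_true, ih, Bool.true_and]
      by_cases hgd : (!PySem.Str.startswith (PySem.Str.strip l) ">" &&
          !PySem.Str.startswith (PySem.Str.strip l) "E") = true
      · simp only [hgd, if_true]
        cases pvLastGood rest <;> cases first <;> rfl
      · simp only [hgd, Bool.false_eq_true, if_false]
        cases pvLastGood rest <;> cases first <;> rfl
    · simp only [hne, Bool.false_eq_true, Bool.false_and, if_false, ih]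
      cases pvLastGood rest <;> rfl

-- ===== VERDICT (by name: the statement is the Claim_ definition above) =====
theorem summarize_error_py_spec : Claim_equal_summarize_error_py := by
  intro em _
  unfold Spec_summarize_error_py summarize_error_py summarize_error_py_alt
  by_cases h0 : (PySem.Str.len em == 0) = true
  · simp only [h0, if_true]
  · simp only [h0, Bool.false_eq_true, if_false]
    rw [pvLoopRevA_reverse, pvLoopFwdA_eq, pvScanB_spec]
    cases pvLastGood ((PySem.Str.split? em "\n").getD []) with
    | some g => rfl
    | none =>
      cases pvFirstNE ((PySem.Str.split? em "\n").getD []) <;> rfl
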